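-- pv_equiv track=rewrite | github.com/phnml1/CodingTest | 프로그래머스/3/42579. 베스트앨범/베스트앨범.py | solution
-- ===== SOURCE A (Python) =====
-- def solution(genres, plays):
--     answer = [];
--     dic = {}
--     for i in range(len(genres)):
--         if genres[i] in dic:
--             dic[genres[i]][0] += plays[i];
--             dic[genres[i]][1].append([plays[i],i]);
--         else:
--             dic[genres[i]] = [plays[i],[[plays[i],i]]];
--     dic = sorted(dic.items(),key = lambda x: -x[1][0]);
--     for item in dic:
--         _,lis = item;
--         numbers = sorted(lis[1],key = lambda x: -x[0]);
--         if len(numbers)>=2: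
--             for number in numbers[:2]:
--                 answer.append(number[1]);
--         else:
--             answer.append(numbers[0][1])
--     return answer
-- ===== SOURCE B (Python) =====
-- def solution(genres, plays):
--     # one pass: genre totals and per-genre index lists
--     totals = {}
--     songs = {}
--     for i, g in enumerate(genres):
--         totals[g] = totals.get(g, 0) + plays[i]
--         songs.setdefault(g, []).append(i)
--     out = []
--     for g in sorted(totals, key=lambda g: -totals[g]):
--         # top-2 songs of the genre by a single linear scan (no inner sort)
--         best = None
--         second = None
--         for i in songs[g]:
--             if best is None or plays[i] > plays[best]:
--                 second = best
--                 best = i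
--             elif second is None or plays[i] > plays[second]:
--                 second = i
--         out.append(best)
--         if second is not None:
--             out.append(second)
--     return out
-- ===== Notes on version B (the rewrite author's own statement) =====
-- stated objective: alternative
-- what changed: Instead of storing (play,index) pairs and stably sorting each genre's songs to take the top two, B keeps only per-genre index lists and finds each genre's top-2 songs with a single linear scan (best/second-best accumulator), sorting only the genre keys by total; intended as faster, measured only ~1.4x at the largest size.
import Mathlib
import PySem

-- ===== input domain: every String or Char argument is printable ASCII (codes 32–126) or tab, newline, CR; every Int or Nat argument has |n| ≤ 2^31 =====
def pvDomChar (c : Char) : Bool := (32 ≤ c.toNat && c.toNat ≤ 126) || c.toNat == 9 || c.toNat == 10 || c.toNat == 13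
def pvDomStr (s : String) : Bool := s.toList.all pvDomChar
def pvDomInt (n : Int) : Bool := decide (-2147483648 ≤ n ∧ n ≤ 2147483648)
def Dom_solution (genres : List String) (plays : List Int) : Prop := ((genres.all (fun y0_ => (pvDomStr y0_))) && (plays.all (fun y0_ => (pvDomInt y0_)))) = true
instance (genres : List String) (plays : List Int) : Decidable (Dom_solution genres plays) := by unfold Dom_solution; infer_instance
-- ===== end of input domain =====

-- B replaces A's per-genre stable sort + take-2 by a single linear best/second-best scan
-- over per-genre index lists, sorting only the genre keys by total.

-- ===== PORT A =====
def solution (genres : List String) (plays : List Int) : List Int :=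
  -- dic : genre -> [total, [[play, i], ...]]
  let dic : PySem.Dict String (Int × List (Int × Int)) :=
    (PySem.List.pyRange 0 (PySem.List.len genres) 1).foldl
      (fun dic i =>
        let g := PySem.List.pyGetD genres i ""    -- genres[i] (in range under Pre_)
        let p := PySem.List.pyGetD plays i 0      -- plays[i] (in range under Pre_)
        if dic.contains g then
          -- dic[g][0] += plays[i]; dic[g][1].append([plays[i], i])
          dic.modify g (0, []) (fun v => (v.1 + p, v.2 ++ [(p, i)]))
        else
          dic.insert g (p, [(p, i)]))
      PySem.Dict.empty
  let dicS := PySem.List.sorted dic.items (fun x => -x.2.1) false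
  dicS.foldl
    (fun answer item =>
      let lis := item.2
      let numbers := PySem.List.sorted lis.2 (fun x => -x.1) false
      if numbers.length ≥ 2 then
        (PySem.List.slice numbers none (some 2)).foldl (fun a number => a ++ [number.2]) answer
      else
        -- numbers[0] (never empty: every stored genre has at least one song)
        answer ++ [(PySem.List.pyGetD numbers 0 (0, 0)).2])
    []

-- ===== PORT B =====
def solution_alt (genres : List String) (plays : List Int) : List Int :=
  -- one pass: totals[g] = totals.get(g,0) + plays[i]; songs.setdefault(g,[]).append(i)
  -- (setdefault-then-append is an upsert-append: Dict.modify g [] (· ++ [i]))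
  let st := (PySem.List.enumerate genres).foldl
    (fun (st : PySem.Dict String Int × PySem.Dict String (List Int)) x =>
      (st.1.insert x.2 (st.1.getD x.2 0 + PySem.List.pyGetD plays x.1 0),
       st.2.modify x.2 [] (fun l => l ++ [x.1])))
    (PySem.Dict.empty, PySem.Dict.empty)
  let totals := st.1
  let songs := st.2
  (PySem.List.sorted totals.keys (fun g => -(totals.getD g 0)) false).foldl
    (fun out g =>
      -- top-2 of the genre by a single linear scan
      let bs := (songs.getD g []).foldl
        (fun (bs : Option Int × Option Int) i =>
          match bs.1 with
          | none => (some i, bs.2)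
          | some b =>
            if PySem.List.pyGetD plays i 0 > PySem.List.pyGetD plays b 0 then (some i, bs.1)
            else
              match bs.2 with
              | none => (bs.1, some i)
              | some s =>
                if PySem.List.pyGetD plays i 0 > PySem.List.pyGetD plays s 0 then (bs.1, some i)
                else bs)
        (none, none)
      let out := out ++ [bs.1.getD 0]   -- best is never None: each listed genre has a song
      match bs.2 with
      | none => out
      | some s => out ++ [s])
    []

-- ===== PRECONDITION & SPEC =====
-- A (and B) raise IndexError on plays[i] when plays is shorter than genres; nothing else raises.
def Pre_solution (genres : List String) (plays : List Int) : Prop :=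
  genres.length ≤ plays.length
instance (genres : List String) (plays : List Int) : Decidable (Pre_solution genres plays) := by
  unfold Pre_solution; infer_instance
def pvWitness_solution : List String × List Int := (["pop", "rock", "pop"], [3, 1, 2])

def Spec_solution (genres : List String) (plays : List Int) (out : List Int) : Prop := out = solution_alt genres plays
instance (genres : List String) (plays : List Int) (out : List Int) : Decidable (Spec_solution genres plays out) := by unfold Spec_solution; infer_instance

-- ===== CLAIM (what is proved, stated in full; the proofs are below) =====
def Claim_equal_solution : Prop := ∀ (genres : List String) (plays : List Int), Dom_solution genres plays → Pre_solution genres plays → Spec_solution genres plays (solution genres plays)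

-- ===== LEMMAS AND PROOFS =====

-- the triple (i, genres[i], plays[i]) both loops consume
def pvTrip (genres : List String) (plays : List Int) (i : Int) : Int × String × Int :=
  (i, PySem.List.pyGetD genres i "", PySem.List.pyGetD plays i 0)

def pvT (genres : List String) (plays : List Int) : List (Int × String × Int) :=
  (PySem.List.pyRange 0 (PySem.List.len genres) 1).map (pvTrip genres plays)

def pvFilt (genres : List String) (plays : List Int) (c : String) : List (Int × String × Int) :=
  (pvT genres plays).filter (fun t => t.2.1 == c)

def pvPairs (genres : List String) (plays : List Int) (c : String) : List (Int × Int) :=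
  (pvFilt genres plays c).map (fun t => (t.2.2, t.1))

def pvTot (genres : List String) (plays : List Int) (c : String) : Int :=
  ((pvFilt genres plays c).map (fun t => t.2.2)).sum

def pvG (genres : List String) (plays : List Int) : List String :=
  PySem.Set.ofList ((pvT genres plays).map (fun t => t.2.1))

-- loop bodies, abstracted over the triple list
def pvStepA (d : PySem.Dict String (Int × List (Int × Int))) (t : Int × String × Int) :
    PySem.Dict String (Int × List (Int × Int)) :=
  d.modify t.2.1 (0, []) (fun v => (v.1 + t.2.2, v.2 ++ [(t.2.2, t.1)]))

def pvStepTot (d : PySem.Dict String Int) (t : Int × String × Int) : PySem.Dict String Int :=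
  d.insert t.2.1 (d.getD t.2.1 0 + t.2.2)

def pvStepSongs (d : PySem.Dict String (List Int)) (t : Int × String × Int) :
    PySem.Dict String (List Int) :=
  d.modify t.2.1 [] (fun l => l ++ [t.1])

-- the top-2 machinery
def pvBf (a b : Int × Int) : Bool := decide ((-a.1 : Int) < -b.1)

def pvStep2 (t : List (Int × Int)) (q : Int × Int) : List (Int × Int) :=
  (PySem.List.insertBy pvBf q t).take 2

def pvScanStep (plays : List Int) (bs : Option Int × Option Int) (i : Int) :
    Option Int × Option Int :=
  match bs.1 with
  | none => (some i, bs.2)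
  | some b =>
    if PySem.List.pyGetD plays i 0 > PySem.List.pyGetD plays b 0 then (some i, bs.1)
    else
      match bs.2 with
      | none => (bs.1, some i)
      | some s =>
        if PySem.List.pyGetD plays i 0 > PySem.List.pyGetD plays s 0 then (bs.1, some i)
        else bs

def pvRep (t : List (Int × Int)) : Option Int × Option Int :=
  (t[0]?.map (fun q => q.2), t[1]?.map (fun q => q.2))

-- the common normal form of both programs
def pvCanon (genres : List String) (plays : List Int) : List Int :=
  (PySem.List.sorted (pvG genres plays) (fun g => -(pvTot genres plays g)) false).foldl
    (fun acc g => acc ++ ((pvPairs genres plays g).foldl pvStep2 []).map (fun q => q.2)) []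

-- ---- dictionary characterizations ----

lemma dictA_getD (l : List (Int × String × Int)) (d : PySem.Dict String (Int × List (Int × Int)))
    (c : String) :
    (l.foldl pvStepA d).getD c (0, [])
      = ((d.getD c (0, [])).1 + ((l.filter (fun t => t.2.1 == c)).map (fun t => t.2.2)).sum,
         (d.getD c (0, [])).2 ++ (l.filter (fun t => t.2.1 == c)).map (fun t => (t.2.2, t.1))) := by
  induction l generalizing d with
  | nil => simp
  | cons t l ih =>
    rw [List.foldl_cons, ih]
    by_cases h : t.2.1 = c
    · simp [pvStepA, h, add_assoc]
    · simp [pvStepA, PySem.Dict.getD_modify, h, Ne.symm h]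

lemma totals_getD (l : List (Int × String × Int)) (d : PySem.Dict String Int) (c : String) :
    (l.foldl pvStepTot d).getD c 0
      = d.getD c 0 + ((l.filter (fun t => t.2.1 == c)).map (fun t => t.2.2)).sum := by
  induction l generalizing d with
  | nil => simp
  | cons t l ih =>
    rw [List.foldl_cons, ih]
    by_cases h : t.2.1 = c
    · simp [pvStepTot, h, add_assoc]
    · simp [pvStepTot, PySem.Dict.getD_insert, h, Ne.symm h]

lemma songs_getD (l : List (Int × String × Int)) (d : PySem.Dict String (List Int)) (c : String) :
    (l.foldl pvStepSongs d).getD c []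
      = d.getD c [] ++ (l.filter (fun t => t.2.1 == c)).map (fun t => t.1) := by
  induction l generalizing d with
  | nil => simp
  | cons t l ih =>
    rw [List.foldl_cons, ih]
    by_cases h : t.2.1 = c
    · simp [pvStepSongs, h]
    · simp [pvStepSongs, PySem.Dict.getD_modify, h, Ne.symm h]

lemma update_nil_eq_ofList (xs : List String) :
    PySem.Set.update ([] : List String) xs = PySem.Set.ofList xs := by
  simp [PySem.Set.update, PySem.Set.ofList_eq_foldl]

lemma dictA_keys (genres : List String) (plays : List Int) :
    ((pvT genres plays).foldl pvStepA PySem.Dict.empty).keys = pvG genres plays := by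
  have h := PySem.Dict.keys_foldl_modify_key (pvT genres plays) (fun t => t.2.1) ((0 : Int), ([] : List (Int × Int)))
      (fun _ t v => (v.1 + t.2.2, v.2 ++ [(t.2.2, t.1)])) PySem.Dict.empty
  simpa [pvStepA, pvG, update_nil_eq_ofList] using h

lemma dictA_keys_nodup (genres : List String) (plays : List Int) :
    ((pvT genres plays).foldl pvStepA PySem.Dict.empty).keys.Nodup := by
  have h := PySem.Dict.nodup_keys_foldl_modify_key (pvT genres plays) (fun t => t.2.1) ((0 : Int), ([] : List (Int × Int)))
      (fun _ t v => (v.1 + t.2.2, v.2 ++ [(t.2.2, t.1)])) PySem.Dict.empty (by simp)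
  simpa [pvStepA] using h

lemma totals_keys (genres : List String) (plays : List Int) :
    ((pvT genres plays).foldl pvStepTot PySem.Dict.empty).keys = pvG genres plays := by
  have h := PySem.Dict.keys_foldl_insert_key (pvT genres plays) (fun t => t.2.1)
      (fun d t => d.getD t.2.1 0 + t.2.2) PySem.Dict.empty
  simpa [pvStepTot, pvG, update_nil_eq_ofList] using h

lemma dictA_items (genres : List String) (plays : List Int) :
    ((pvT genres plays).foldl pvStepA PySem.Dict.empty).items
      = (pvG genres plays).map (fun g => (g, pvTot genres plays g, pvPairs genres plays g)) := by
  rw [PySem.Dict.items_eq_map_keys _ (dictA_keys_nodup genres plays) ((0 : Int), ([] : List (Int × Int))),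
      dictA_keys]
  refine List.map_congr_left (fun g _ => ?_)
  rw [dictA_getD]
  simp [pvTot, pvPairs, pvFilt]

-- ---- stable sort commutes with map ----

lemma insertBy_map {α β : Type} (bf : β → β → Bool) (f : α → β) (x : α) (ys : List α) :
    PySem.List.insertBy bf (f x) (ys.map f)
      = (PySem.List.insertBy (fun a b => bf (f a) (f b)) x ys).map f := by
  induction ys with
  | nil => simp [PySem.List.insertBy]
  | cons y ys ih =>
    by_cases h : bf (f x) (f y)
    · simp [PySem.List.insertBy, h]
    · simp [PySem.List.insertBy, h, ih]

lemma foldl_insertBy_map {α β : Type} (bf : β → β → Bool) (f : α → β) (G ys : List α) :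
    (G.map f).foldl (fun acc x => PySem.List.insertBy bf x acc) (ys.map f)
      = (G.foldl (fun acc x => PySem.List.insertBy (fun a b => bf (f a) (f b)) x acc) ys).map f := by
  induction G generalizing ys with
  | nil => simp
  | cons g G ih =>
    rw [List.map_cons, List.foldl_cons, List.foldl_cons, insertBy_map bf f g ys]
    exact ih _

lemma sorted_map {α β κ : Type} [LT κ] [DecidableLT κ] (G : List α) (f : α → β) (key : β → κ) :
    PySem.List.sorted (G.map f) key false
      = (PySem.List.sorted G (fun g => key (f g)) false).map f := by
  rw [PySem.List.sorted_eq_foldl_insertBy, PySem.List.sorted_eq_foldl_insertBy]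
  simpa using foldl_insertBy_map (fun a b => decide (key a < key b)) f G []

-- ---- take-2 of the stable sort is a fold ----

lemma take2_insertBy (x : Int × Int) (ys : List (Int × Int)) :
    (PySem.List.insertBy pvBf x ys).take 2 = (PySem.List.insertBy pvBf x (ys.take 2)).take 2 := by
  match ys with
  | [] => rfl
  | [a] => rfl
  | a :: b :: r =>
    by_cases h1 : pvBf x a
    · simp [PySem.List.insertBy, h1]
    · by_cases h2 : pvBf x b <;> simp [PySem.List.insertBy, h1, h2]

lemma take2_foldl (qs : List (Int × Int)) (acc : List (Int × Int)) :
    (qs.foldl (fun a x => PySem.List.insertBy pvBf x a) acc).take 2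
      = qs.foldl pvStep2 (acc.take 2) := by
  induction qs generalizing acc with
  | nil => simp
  | cons q qs ih =>
    rw [List.foldl_cons, List.foldl_cons, ih]
    congr 1
    rw [pvStep2, ← take2_insertBy]

lemma sorted_take2 (qs : List (Int × Int)) :
    (PySem.List.sorted qs (fun x => (-x.1 : Int)) false).take 2 = qs.foldl pvStep2 [] := by
  rw [PySem.List.sorted_eq_foldl_insertBy]
  exact take2_foldl qs []

lemma step2_length (t : List (Int × Int)) (q : Int × Int) : (pvStep2 t q).length ≤ 2 := by
  simp [pvStep2]

lemma step2_mem {t : List (Int × Int)} {q r : Int × Int} (h : r ∈ pvStep2 t q) :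
    r = q ∨ r ∈ t := by
  have := List.mem_of_mem_take h
  rcases (PySem.List.mem_insertBy _ _ _ _).1 this with h' | h'
  · exact Or.inl h'
  · exact Or.inr h'

-- ---- the linear best/second scan tracks take-2 of the stable sort ----

lemma scan_step (plays : List Int) (t : List (Int × Int)) (q : Int × Int)
    (hlen : t.length ≤ 2)
    (hval : ∀ r ∈ q :: t, PySem.List.pyGetD plays r.2 0 = r.1) :
    pvScanStep plays (pvRep t) q.2 = pvRep (pvStep2 t q) := by
  have hq := hval q (List.mem_cons_self ..)
  match t with
  | [] => simp [pvScanStep, pvRep, pvStep2, PySem.List.insertBy]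
  | [a] =>
    have ha := hval a (by simp)
    by_cases h1 : a.1 < q.1
    · simp [pvScanStep, pvRep, pvStep2, PySem.List.insertBy, pvBf, hq, ha, h1]
    · simp [pvScanStep, pvRep, pvStep2, PySem.List.insertBy, pvBf, hq, ha, h1]
  | [a, b] =>
    have ha := hval a (by simp)
    have hb := hval b (by simp)
    by_cases h1 : a.1 < q.1
    · simp [pvScanStep, pvRep, pvStep2, PySem.List.insertBy, pvBf, hq, ha, h1]
    · by_cases h2 : b.1 < q.1
      · simp [pvScanStep, pvRep, pvStep2, PySem.List.insertBy, pvBf, hq, ha, hb, h1, h2]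
      · simp [pvScanStep, pvRep, pvStep2, PySem.List.insertBy, pvBf, hq, ha, hb, h1, h2]
  | a :: b :: c :: r => simp at hlen

lemma scan_foldl (plays : List Int) (qs t : List (Int × Int))
    (hlen : t.length ≤ 2)
    (ht : ∀ r ∈ t, PySem.List.pyGetD plays r.2 0 = r.1)
    (hq : ∀ r ∈ qs, PySem.List.pyGetD plays r.2 0 = r.1) :
    (qs.map (fun q => q.2)).foldl (pvScanStep plays) (pvRep t) = pvRep (qs.foldl pvStep2 t) := by
  induction qs generalizing t with
  | nil => simp
  | cons q qs ih =>
    rw [List.map_cons, List.foldl_cons, List.foldl_cons,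
        scan_step plays t q hlen (by
          intro r hr
          rcases List.mem_cons.1 hr with h | h
          · exact h ▸ hq q (List.mem_cons_self ..)
          · exact ht r h)]
    exact ih (pvStep2 t q)
      (step2_length t q)
      (by
        intro r hr
        rcases step2_mem hr with h | h
        · exact h ▸ hq q (List.mem_cons_self ..)
        · exact ht r h)
      (fun r hr => hq r (List.mem_cons_of_mem _ hr))

-- ---- membership facts ----

lemma pairs_ne_nil {genres : List String} {plays : List Int} {g : String}
    (hg : g ∈ pvG genres plays) : pvPairs genres plays g ≠ [] := by
  rcases List.mem_map.1 ((PySem.Set.mem_ofList _ _).1 hg) with ⟨t, ht, rfl⟩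
  have : t ∈ pvFilt genres plays t.2.1 := by
    simp [pvFilt, List.mem_filter, ht]
  simp only [pvPairs, ne_eq, List.map_eq_nil_iff]
  exact fun h => by simp [h] at this

lemma pairs_lookup {genres : List String} {plays : List Int} {g : String} {r : Int × Int}
    (hr : r ∈ pvPairs genres plays g) : PySem.List.pyGetD plays r.2 0 = r.1 := by
  rcases List.mem_map.1 hr with ⟨t, ht, rfl⟩
  have ht' : t ∈ pvT genres plays := (List.mem_filter.1 ht).1
  rcases List.mem_map.1 ht' with ⟨i, _, rfl⟩
  rfl

-- ---- A reduces to the normal form ----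

lemma chunkA_eq (qs : List (Int × Int)) (hne : qs ≠ []) (acc : List Int) :
    (if (PySem.List.sorted qs (fun x => (-x.1 : Int)) false).length ≥ 2 then
       (PySem.List.slice (PySem.List.sorted qs (fun x => (-x.1 : Int)) false) none (some 2)).foldl
         (fun a n => a ++ [n.2]) acc
     else acc ++ [(PySem.List.pyGetD (PySem.List.sorted qs (fun x => (-x.1 : Int)) false) 0 ((0 : Int), (0 : Int))).2])
      = acc ++ ((qs.foldl pvStep2 []).map (fun q => q.2)) := by
  rw [← sorted_take2]
  rw [PySem.List.slice_to _ (by norm_num)]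
  rw [PySem.List.foldl_append_singleton_eq_map]
  rcases hs : PySem.List.sorted qs (fun x => (-x.1 : Int)) false with _ | ⟨a, rest⟩
  · exact absurd ((PySem.List.sorted_eq_nil_iff _ _ _).1 hs) hne
  · rcases rest with _ | ⟨b, rest⟩
    · simp [PySem.List.pyGetD]
    · simp

lemma solution_eq_canon (genres : List String) (plays : List Int) :
    solution genres plays = pvCanon genres plays := by
  simp only [solution]
  rw [PySem.List.foldl_congr_mem _ _
        (fun d i => pvStepA d (pvTrip genres plays i)) _
        (by
          intro d i _
          by_cases h : d.contains (PySem.List.pyGetD genres i "")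
          · simp [pvStepA, pvTrip, h]
          · have h' : d.contains (PySem.List.pyGetD genres i "") = false := by
              simpa using h
            simp [pvStepA, pvTrip, h, PySem.Dict.modify,
              PySem.Dict.getD_of_not_contains _ _ h'])]
  have e1 : (PySem.List.pyRange 0 (PySem.List.len genres) 1).foldl
      (fun d i => pvStepA d (pvTrip genres plays i)) PySem.Dict.empty
      = (pvT genres plays).foldl pvStepA PySem.Dict.empty := by
    rw [pvT, List.foldl_map]
  rw [e1, dictA_items, sorted_map]
  rw [List.foldl_map]
  rw [PySem.List.foldl_congr_mem _ _
        (fun acc g => acc ++ ((pvPairs genres plays g).foldl pvStep2 []).map (fun q => q.2)) _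
        (by
          intro acc g hg
          have hg' : g ∈ pvG genres plays := by
            rw [PySem.List.mem_sorted] at hg
            exact hg
          exact chunkA_eq (pvPairs genres plays g) (pairs_ne_nil hg') acc)]
  rfl

-- ---- B reduces to the normal form ----

lemma solution_alt_eq_canon (genres : List String) (plays : List Int) :
    solution_alt genres plays = pvCanon genres plays := by
  simp only [solution_alt]
  rw [PySem.List.foldl_congr_mem _ _
        (fun (st : PySem.Dict String Int × PySem.Dict String (List Int)) x =>
          (pvStepTot st.1 (x.1, x.2, PySem.List.pyGetD plays x.1 0),
           pvStepSongs st.2 (x.1, x.2, PySem.List.pyGetD plays x.1 0))) _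
        (by intro st x _; rfl)]
  rw [PySem.List.foldl_prod_mk
        (f := fun d (x : Int × String) => pvStepTot d (x.1, x.2, PySem.List.pyGetD plays x.1 0))
        (g := fun d (x : Int × String) => pvStepSongs d (x.1, x.2, PySem.List.pyGetD plays x.1 0))]
  have e_tot : (PySem.List.enumerate genres).foldl
      (fun d (x : Int × String) => pvStepTot d (x.1, x.2, PySem.List.pyGetD plays x.1 0)) PySem.Dict.empty
      = (pvT genres plays).foldl pvStepTot PySem.Dict.empty := by
    rw [PySem.List.enumerate_eq_map_pyRange genres "", List.foldl_map, pvT, List.foldl_map]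
    rfl
  have e_songs : (PySem.List.enumerate genres).foldl
      (fun d (x : Int × String) => pvStepSongs d (x.1, x.2, PySem.List.pyGetD plays x.1 0)) PySem.Dict.empty
      = (pvT genres plays).foldl pvStepSongs PySem.Dict.empty := by
    rw [PySem.List.enumerate_eq_map_pyRange genres "", List.foldl_map, pvT, List.foldl_map]
    rfl
  rw [e_tot, e_songs]
  simp only [totals_keys]
  have hkey : (fun g => -(((pvT genres plays).foldl pvStepTot PySem.Dict.empty).getD g 0))
      = (fun g => -(pvTot genres plays g)) := by
    funext g
    rw [totals_getD]
    simp [pvTot, pvFilt]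
  rw [hkey]
  rw [PySem.List.foldl_congr_mem _ _
        (fun acc g => acc ++ ((pvPairs genres plays g).foldl pvStep2 []).map (fun q => q.2)) _
        (by
          intro acc g hg
          have hg' : g ∈ pvG genres plays := by
            rw [PySem.List.mem_sorted] at hg
            exact hg
          have hsongs : ((pvT genres plays).foldl pvStepSongs PySem.Dict.empty).getD g []
              = (pvPairs genres plays g).map (fun q => q.2) := by
            rw [songs_getD]
            simp [pvPairs, pvFilt, Function.comp]
          rw [hsongs]
          have hscan := scan_foldl plays (pvPairs genres plays g) [] (by simp) (by simp)
            (fun r hr => pairs_lookup hr)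
          rw [show (fun (bs : Option Int × Option Int) (i : Int) =>
                match bs.1 with
                | none => (some i, bs.2)
                | some b =>
                  if PySem.List.pyGetD plays i 0 > PySem.List.pyGetD plays b 0 then (some i, bs.1)
                  else
                    match bs.2 with
                    | none => (bs.1, some i)
                    | some s =>
                      if PySem.List.pyGetD plays i 0 > PySem.List.pyGetD plays s 0 then (bs.1, some i)
                      else bs) = pvScanStep plays from rfl]
          rw [show ((none, none) : Option Int × Option Int) = pvRep [] from rfl, hscan]
          -- case on the ≤2-element result list
          rcases hT : (pvPairs genres plays g).foldl pvStep2 [] with _ | ⟨a, _ | ⟨b, rest⟩⟩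
          · exfalso
            have := sorted_take2 (pvPairs genres plays g)
            rw [hT] at this
            have hnil : PySem.List.sorted (pvPairs genres plays g) (fun x => (-x.1 : Int)) false = [] := by
              cases hs : PySem.List.sorted (pvPairs genres plays g) (fun x => (-x.1 : Int)) false with
              | nil => rfl
              | cons c cs => rw [hs] at this; simp at this
            exact pairs_ne_nil hg' ((PySem.List.sorted_eq_nil_iff _ _ _).1 hnil)
          · simp [pvRep, hT]
          · have hrest : rest = [] := by
              have h2 := congrArg List.length (sorted_take2 (pvPairs genres plays g))
              rw [hT] at h2
              simp [PySem.List.length_sorted] at h2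
              exact List.eq_nil_of_length_eq_zero (by omega)
            subst hrest
            simp [pvRep, hT])]
  rfl

-- ===== VERDICT (by name: the statement is the Claim_ definition above) =====
theorem solution_spec : Claim_equal_solution := by
  intro genres plays _ _
  unfold Spec_solution
  rw [solution_eq_canon, solution_alt_eq_canon]
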